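-- pv_equiv track=rewrite | github.com/ehavugi/english2kinyarwanda | code/kinyarwanda_test.py | consonants_in
-- ===== SOURCE A (Python) =====
-- imibare=["0","1","2","3","4","5","6","7","8","9"]
--
-- consonants=["b","c","d","f","g","h","j","k","l","m","n","p","r","s","t", "q","w","v","y","z"]
--
-- def consonants_in(kinyaR):
-- 	""""takes a list of words,  and return consonants combination """
-- 	consonants_combo=[]
-- 	for a in kinyaR:
-- 		a=a.lower().strip()
-- 		# if i in "aioeu":
-- 		# 	a=a.replace(i,",")
--
-- 		a=a.split(" ")
-- 		for i in a:
-- 			k=i.split("i")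
-- 			for b in k:
-- 				c=b.split("o")
-- 				for d in c:
-- 					g=d.split("u")
-- 					for h in g:
-- 						m=h.split("a")
-- 						for j in m:
-- 							q=j.split("e")
-- 							for i in q:
-- 								consonants_only=True
-- 								for b in i:
-- 									if b not in consonants or (b in imibare):
-- 										consonants_only=False
-- 								if consonants_only:
-- 									if not ( i in consonants_combo or  ( i in imibare)) :
-- 										consonants_combo.append(i)
-- 									else:
-- 										consonants_combo.append(i)
--
-- 								else:
-- 									continue
--
-- 	return consonants_combo
-- ===== SOURCE B (Python) =====
-- imibare=["0","1","2","3","4","5","6","7","8","9"]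
--
-- consonants=["b","c","d","f","g","h","j","k","l","m","n","p","r","s","t", "q","w","v","y","z"]
--
-- _DELIMS = set("aeiou ")
-- _CONS = set(consonants)
--
-- def consonants_in(kinyaR):
--     """takes a list of words, and return consonants combination"""
--     out = []
--     for word in kinyaR:
--         text = word.lower().strip()
--         buf = []
--         for ch in text:
--             if ch in _DELIMS:
--                 if all(c in _CONS for c in buf):
--                     out.append(''.join(buf))
--                 buf = []
--             else:
--                 buf.append(ch)
--         if all(c in _CONS for c in buf):
--             out.append(''.join(buf))
--     return out
-- ===== Notes on version B (the rewrite author's own statement) =====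
-- stated objective: faster
-- what changed: Replaced A's five nested vowel-split loops (split on ' ', then 'i','o','u','a','e') plus its membership test over the growing result list by a single left-to-right scan per word that keeps a consonant-run buffer and emits it at every vowel/space and at the end.
import Mathlib
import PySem

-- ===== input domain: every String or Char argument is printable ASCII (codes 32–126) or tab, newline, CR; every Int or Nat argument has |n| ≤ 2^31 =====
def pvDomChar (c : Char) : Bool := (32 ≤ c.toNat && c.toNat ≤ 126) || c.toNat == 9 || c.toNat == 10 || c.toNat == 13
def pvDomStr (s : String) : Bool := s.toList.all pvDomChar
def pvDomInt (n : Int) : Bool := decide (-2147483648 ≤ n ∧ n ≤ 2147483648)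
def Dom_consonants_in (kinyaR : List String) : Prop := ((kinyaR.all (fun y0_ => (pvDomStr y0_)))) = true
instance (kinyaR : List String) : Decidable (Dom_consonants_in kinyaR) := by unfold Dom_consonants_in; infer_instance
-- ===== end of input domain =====

-- B replaces A's five nested vowel-split loops and its scan of the growing result list by one
-- linear pass per word keeping a consonant-run buffer; measured faster (A is quadratic).

-- ===== PORT A =====
-- module constants
def pvImibareC : List Char := ['0','1','2','3','4','5','6','7','8','9']
def pvImibareS : List String := ["0","1","2","3","4","5","6","7","8","9"]
def pvConsC : List Char :=
  ['b','c','d','f','g','h','j','k','l','m','n','p','r','s','t','q','w','v','y','z']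

-- literal transliteration of A: per word lower/strip, split on " ", then nested splits on
-- 'i','o','u','a','e'; the innermost loop tests consonants-only and appends (both branches of
-- A's final if/else append, as in the Python).
def consonants_in (kinyaR : List String) : List String :=
  kinyaR.foldl (fun combo a0 =>
    let a1 : List Char := PySem.Chars.strip (PySem.Chars.lower a0.toList)
    (PySem.Chars.splitOn a1 [' ']).foldl (fun combo i =>
      (PySem.Chars.splitOn i ['i']).foldl (fun combo b =>
        (PySem.Chars.splitOn b ['o']).foldl (fun combo d =>
          (PySem.Chars.splitOn d ['u']).foldl (fun combo h =>
            (PySem.Chars.splitOn h ['a']).foldl (fun combo j =>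
              (PySem.Chars.splitOn j ['e']).foldl (fun combo i2 =>
                let consonants_only : Bool :=
                  i2.foldl (fun co b => if b ∉ pvConsC ∨ b ∈ pvImibareC then false else co) true
                if consonants_only then
                  (if ¬ (String.ofList i2 ∈ combo ∨ String.ofList i2 ∈ pvImibareS) then
                    combo ++ [String.ofList i2]
                  else
                    combo ++ [String.ofList i2])
                else combo)
                combo) combo) combo) combo) combo) combo) []

-- ===== PORT B =====
def pvDelims : List Char := ['a','e','i','o','u',' ']

-- all(c in _CONS for c in buf)
def pvAllCons (buf : List Char) : Bool := buf.all (fun ch => decide (ch ∈ pvConsC))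

-- emit the buffer: append it iff it is consonants-only
def pvEmit (buf : List Char) : List String :=
  if pvAllCons buf then [String.ofList buf] else []

-- the single left-to-right scan of B's inner loop: delimiters flush the buffer
def pvScan (buf : List Char) : List Char → List String
  | [] => pvEmit buf
  | c :: cs => if c ∈ pvDelims then pvEmit buf ++ pvScan [] cs else pvScan (buf ++ [c]) cs

def consonants_in_alt (kinyaR : List String) : List String :=
  kinyaR.foldl (fun out w =>
    out ++ pvScan [] (PySem.Chars.strip (PySem.Chars.lower w.toList))) []

-- ===== PRECONDITION & SPEC =====
def Spec_consonants_in (kinyaR : List String) (out : List String) : Prop := out = consonants_in_alt kinyaR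
instance (kinyaR : List String) (out : List String) : Decidable (Spec_consonants_in kinyaR out) := by unfold Spec_consonants_in; infer_instance

-- ===== CLAIM (what is proved, stated in full; the proofs are below) =====
def Claim_equal_consonants_in : Prop := ∀ (kinyaR : List String), Dom_consonants_in kinyaR → Spec_consonants_in kinyaR (consonants_in kinyaR)

-- ===== LEMMAS AND PROOFS =====

-- canonical "split on every char satisfying p" (Python split semantics, empties kept),
-- phrased as (first fragment, later fragments) so the result is visibly nonempty
def pvSplitP (p : Char → Bool) : List Char → (List Char × List (List Char))
  | [] => ([], [])
  | c :: cs =>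
    let r := pvSplitP p cs
    if p c then ([], r.1 :: r.2) else (c :: r.1, r.2)

def pvSplit (p : Char → Bool) (l : List Char) : List (List Char) :=
  (pvSplitP p l).1 :: (pvSplitP p l).2

lemma pv_go_char (c : Char) : ∀ (fuel : Nat) (l cur : List Char) (acc : List (List Char)),
    l.length < fuel →
    PySem.Chars.splitOn.go [c] fuel l cur acc =
      acc.reverse ++ (cur.reverse ++ (pvSplitP (· == c) l).1) :: (pvSplitP (· == c) l).2 := by
  intro fuel
  induction fuel with
  | zero => intro l cur acc h; omega
  | succ n ih =>
    intro l cur acc h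
    cases l with
    | nil => simp [PySem.Chars.splitOn.go, pvSplitP]
    | cons d rest =>
      rw [PySem.Chars.splitOn.go]
      by_cases hd : c = d
      · subst hd
        simp only [List.isPrefixOf, BEq.rfl, Bool.and_true, if_pos]
        rw [ih _ _ _ (by simpa using Nat.lt_of_succ_lt_succ (by simpa using h))]
        simp [pvSplitP]
      · have hbeq : ([c].isPrefixOf (d :: rest)) = false := by
          simp [List.isPrefixOf]; exact fun hh => hd (by simpa using hh)
        simp only [hbeq, Bool.false_eq_true, if_false]
        rw [ih _ _ _ (by simpa using Nat.lt_of_succ_lt_succ (by simpa using h))]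
        have hdc : (d == c) = false := by
          simp only [beq_eq_false_iff_ne]; exact fun hh => hd hh.symm
        simp [pvSplitP, hdc]

@[simp] lemma pv_splitOn_single (l : List Char) (c : Char) :
    PySem.Chars.splitOn l [c] = pvSplit (· == c) l := by
  unfold PySem.Chars.splitOn pvSplit
  rw [pv_go_char c (l.length + 1) l [] [] (by omega)]
  simp

-- splitting every fragment of a p-split by q is splitting by (p or q)
lemma pv_split_merge (p q : Char → Bool) : ∀ l : List Char,
    (pvSplit p l).flatMap (pvSplit q) = pvSplit (fun c => p c || q c) l := by
  intro l
  induction l with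
  | nil => simp [pvSplit, pvSplitP]
  | cons c cs ih =>
    by_cases hp : p c
    · have h1 : (pvSplit p (c :: cs)) = [] :: pvSplit p cs := by
        simp [pvSplit, pvSplitP, hp]
      have h2 : pvSplit (fun c => p c || q c) (c :: cs) = [] :: pvSplit (fun c => p c || q c) cs := by
        simp [pvSplit, pvSplitP, hp]
      rw [h1, h2, ← ih]
      simp [pvSplit, pvSplitP]
    · have hcons : pvSplit p (c :: cs) = (c :: (pvSplitP p cs).1) :: (pvSplitP p cs).2 := by
        simp [pvSplit, pvSplitP, hp]
      by_cases hq : q c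
      · rw [hcons]
        have h2 : pvSplit (fun c => p c || q c) (c :: cs) =
            [] :: pvSplit (fun c => p c || q c) cs := by
          simp [pvSplit, pvSplitP, hp, hq]
        rw [h2, ← ih]
        have h3 : pvSplit q (c :: (pvSplitP p cs).1) = [] :: pvSplit q (pvSplitP p cs).1 := by
          simp [pvSplit, pvSplitP, hq]
        simp only [List.flatMap_cons, h3]
        have h4 : (pvSplit p cs).flatMap (pvSplit q) =
            pvSplit q (pvSplitP p cs).1 ++ (pvSplitP p cs).2.flatMap (pvSplit q) := by
          simp [pvSplit]
        rw [h4]; simp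
      · rw [hcons]
        have h3 : pvSplit q (c :: (pvSplitP p cs).1) =
            (c :: (pvSplitP q (pvSplitP p cs).1).1) :: (pvSplitP q (pvSplitP p cs).1).2 := by
          simp [pvSplit, pvSplitP, hq]
        have h4 : (pvSplit p cs).flatMap (pvSplit q) =
            pvSplit q (pvSplitP p cs).1 ++ (pvSplitP p cs).2.flatMap (pvSplit q) := by
          simp [pvSplit]
        have ih' := ih
        rw [h4] at ih'
        have h2 : pvSplit (fun c => p c || q c) (c :: cs) =
            (c :: (pvSplitP (fun c => p c || q c) cs).1) ::
              (pvSplitP (fun c => p c || q c) cs).2 := by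
          simp [pvSplit, pvSplitP, hp, hq]
        rw [h2]
        simp only [List.flatMap_cons, h3]
        have hh : pvSplit q (pvSplitP p cs).1 =
            (pvSplitP q (pvSplitP p cs).1).1 :: (pvSplitP q (pvSplitP p cs).1).2 := rfl
        rw [hh] at ih'
        simp only [pvSplit, List.cons_append] at ih' ⊢
        have h5 := List.head_eq_of_cons_eq ih'
        have h6 := List.tail_eq_of_cons_eq ih'
        rw [← h5, ← h6]

lemma pv_split_congr (p q : Char → Bool) (h : ∀ c, p c = q c) (l : List Char) :
    pvSplit p l = pvSplit q l := by
  rw [show p = q from funext h]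

-- a consonant is never a digit
lemma pv_cons_not_digit (c : Char) (hc : c ∈ pvConsC) : c ∉ pvImibareC := by
  fin_cases hc <;> decide

-- A's inner consonants_only loop computes pvAllCons
lemma pv_innerA : ∀ (l : List Char) (co : Bool),
    l.foldl (fun co b => if b ∉ pvConsC ∨ b ∈ pvImibareC then false else co) co
      = (co && pvAllCons l) := by
  intro l
  induction l with
  | nil => intro co; simp [pvAllCons]
  | cons c cs ih =>
    intro co
    by_cases hc : c ∈ pvConsC
    · have hni := pv_cons_not_digit c hc
      simp only [List.foldl_cons, hni, hc, not_true_eq_false, false_or, ih]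
      simp [pvAllCons, hc]
    · simp only [List.foldl_cons, hc, not_false_eq_true, true_or, if_pos, ih]
      simp [pvAllCons, hc]

-- the delimiter predicates, merged innermost-outward in A's split order
def pvP6 : Char → Bool := fun c => c == 'e'
def pvP5 : Char → Bool := fun c => (c == 'a') || pvP6 c
def pvP4 : Char → Bool := fun c => (c == 'u') || pvP5 c
def pvP3 : Char → Bool := fun c => (c == 'o') || pvP4 c
def pvP2 : Char → Bool := fun c => (c == 'i') || pvP3 c
def pvP1 : Char → Bool := fun c => (c == ' ') || pvP2 c
def pvPB : Char → Bool := fun c => decide (c ∈ pvDelims)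

def pvF6 (x : List Char) : List String := ((pvSplit pvP6 x).filter pvAllCons).map String.ofList
def pvF5 (x : List Char) : List String := ((pvSplit pvP5 x).filter pvAllCons).map String.ofList
def pvF4 (x : List Char) : List String := ((pvSplit pvP4 x).filter pvAllCons).map String.ofList
def pvF3 (x : List Char) : List String := ((pvSplit pvP3 x).filter pvAllCons).map String.ofList
def pvF2 (x : List Char) : List String := ((pvSplit pvP2 x).filter pvAllCons).map String.ofList
def pvF1 (x : List Char) : List String := ((pvSplit pvP1 x).filter pvAllCons).map String.ofList

lemma pv_pred_eq : ∀ c, pvP1 c = pvPB c := by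
  intro c
  apply Bool.eq_iff_iff.mpr
  simp only [pvP1, pvP2, pvP3, pvP4, pvP5, pvP6, pvPB, pvDelims, List.mem_cons,
    List.not_mem_nil, or_false, Bool.or_eq_true, beq_iff_eq, decide_eq_true_eq]
  tauto

-- a foldl whose body extends the accumulator is a flatMap
lemma pv_level (xs : List (List Char)) (g : List Char → List String) (combo : List String)
    (f : List String → List Char → List String)
    (hf : ∀ (acc : List String), ∀ x ∈ xs, f acc x = acc ++ g x) :
    xs.foldl f combo = combo ++ xs.flatMap g :=
  (PySem.List.foldl_congr_mem xs f (fun acc x => acc ++ g x) combo hf).trans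
    (PySem.List.foldl_append_eq_flatMap g xs combo)

-- one merge step of A's flatMap chain
lemma pv_step (pk Q : Char → Bool) (x : List Char) :
    (pvSplit pk x).flatMap (fun y => ((pvSplit Q y).filter pvAllCons).map String.ofList)
      = ((pvSplit (fun c => pk c || Q c) x).filter pvAllCons).map String.ofList := by
  rw [← pv_split_merge, List.filter_flatMap, List.map_flatMap]

lemma pv_L6 (j : List Char) (combo : List String) :
    (pvSplit (fun x => x == 'e') j).foldl (fun combo i2 =>
                let consonants_only : Bool :=
                  i2.foldl (fun co b => if b ∉ pvConsC ∨ b ∈ pvImibareC then false else co) true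
                if consonants_only then
                  (if ¬ (String.ofList i2 ∈ combo ∨ String.ofList i2 ∈ pvImibareS) then
                    combo ++ [String.ofList i2]
                  else
                    combo ++ [String.ofList i2])
                else combo) combo
    = combo ++ pvF6 j := by
  rw [PySem.List.foldl_congr_mem _ _
        (fun combo i2 => if pvAllCons i2 then combo ++ [String.ofList i2] else combo) _
        (by intro acc x _; simp only [pv_innerA, Bool.true_and, ite_self])]
  exact PySem.List.foldl_append_if pvAllCons String.ofList _ combo

lemma pv_L5 (h : List Char) (combo : List String) :
    (pvSplit (fun x => x == 'a') h).foldl (fun combo j =>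
              (pvSplit (fun x => x == 'e') j).foldl (fun combo i2 =>
                let consonants_only : Bool :=
                  i2.foldl (fun co b => if b ∉ pvConsC ∨ b ∈ pvImibareC then false else co) true
                if consonants_only then
                  (if ¬ (String.ofList i2 ∈ combo ∨ String.ofList i2 ∈ pvImibareS) then
                    combo ++ [String.ofList i2]
                  else
                    combo ++ [String.ofList i2])
                else combo) combo) combo
    = combo ++ pvF5 h := by
  refine (pv_level _ pvF6 combo _ ?_).trans ?_
  · intro acc x _; exact pv_L6 x acc
  · congr 1
    exact pv_step (fun x => x == 'a') pvP6 h

lemma pv_L4 (d : List Char) (combo : List String) :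
    (pvSplit (fun x => x == 'u') d).foldl (fun combo h =>
            (pvSplit (fun x => x == 'a') h).foldl (fun combo j =>
              (pvSplit (fun x => x == 'e') j).foldl (fun combo i2 =>
                let consonants_only : Bool :=
                  i2.foldl (fun co b => if b ∉ pvConsC ∨ b ∈ pvImibareC then false else co) true
                if consonants_only then
                  (if ¬ (String.ofList i2 ∈ combo ∨ String.ofList i2 ∈ pvImibareS) then
                    combo ++ [String.ofList i2]
                  else
                    combo ++ [String.ofList i2])
                else combo) combo) combo) combo
    = combo ++ pvF4 d := by
  refine (pv_level _ pvF5 combo _ ?_).trans ?_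
  · intro acc x _; exact pv_L5 x acc
  · congr 1
    exact pv_step (fun x => x == 'u') pvP5 d

lemma pv_L3 (b : List Char) (combo : List String) :
    (pvSplit (fun x => x == 'o') b).foldl (fun combo d =>
          (pvSplit (fun x => x == 'u') d).foldl (fun combo h =>
            (pvSplit (fun x => x == 'a') h).foldl (fun combo j =>
              (pvSplit (fun x => x == 'e') j).foldl (fun combo i2 =>
                let consonants_only : Bool :=
                  i2.foldl (fun co b => if b ∉ pvConsC ∨ b ∈ pvImibareC then false else co) true
                if consonants_only then
                  (if ¬ (String.ofList i2 ∈ combo ∨ String.ofList i2 ∈ pvImibareS) then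
                    combo ++ [String.ofList i2]
                  else
                    combo ++ [String.ofList i2])
                else combo) combo) combo) combo) combo
    = combo ++ pvF3 b := by
  refine (pv_level _ pvF4 combo _ ?_).trans ?_
  · intro acc x _; exact pv_L4 x acc
  · congr 1
    exact pv_step (fun x => x == 'o') pvP4 b

lemma pv_L2 (i : List Char) (combo : List String) :
    (pvSplit (fun x => x == 'i') i).foldl (fun combo b =>
        (pvSplit (fun x => x == 'o') b).foldl (fun combo d =>
          (pvSplit (fun x => x == 'u') d).foldl (fun combo h =>
            (pvSplit (fun x => x == 'a') h).foldl (fun combo j =>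
              (pvSplit (fun x => x == 'e') j).foldl (fun combo i2 =>
                let consonants_only : Bool :=
                  i2.foldl (fun co b => if b ∉ pvConsC ∨ b ∈ pvImibareC then false else co) true
                if consonants_only then
                  (if ¬ (String.ofList i2 ∈ combo ∨ String.ofList i2 ∈ pvImibareS) then
                    combo ++ [String.ofList i2]
                  else
                    combo ++ [String.ofList i2])
                else combo) combo) combo) combo) combo) combo
    = combo ++ pvF2 i := by
  refine (pv_level _ pvF3 combo _ ?_).trans ?_
  · intro acc x _; exact pv_L3 x acc
  · congr 1
    exact pv_step (fun x => x == 'i') pvP3 i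

lemma pv_L1 (t : List Char) (combo : List String) :
    (pvSplit (fun x => x == ' ') t).foldl (fun combo i =>
      (pvSplit (fun x => x == 'i') i).foldl (fun combo b =>
        (pvSplit (fun x => x == 'o') b).foldl (fun combo d =>
          (pvSplit (fun x => x == 'u') d).foldl (fun combo h =>
            (pvSplit (fun x => x == 'a') h).foldl (fun combo j =>
              (pvSplit (fun x => x == 'e') j).foldl (fun combo i2 =>
                let consonants_only : Bool :=
                  i2.foldl (fun co b => if b ∉ pvConsC ∨ b ∈ pvImibareC then false else co) true
                if consonants_only then
                  (if ¬ (String.ofList i2 ∈ combo ∨ String.ofList i2 ∈ pvImibareS) then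
                    combo ++ [String.ofList i2]
                  else
                    combo ++ [String.ofList i2])
                else combo) combo) combo) combo) combo) combo) combo
    = combo ++ pvF1 t := by
  refine (pv_level _ pvF2 combo _ ?_).trans ?_
  · intro acc x _; exact pv_L2 x acc
  · congr 1
    exact pv_step (fun x => x == ' ') pvP2 t


-- per-word value of B
lemma pv_scan_eq : ∀ (l buf : List Char),
    pvScan buf l =
      (((buf ++ (pvSplitP pvPB l).1) :: (pvSplitP pvPB l).2).filter pvAllCons).map
        String.ofList := by
  intro l
  induction l with
  | nil =>
    intro buf
    by_cases hbuf : pvAllCons buf <;> simp [pvScan, pvEmit, pvSplitP, List.filter, hbuf]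
  | cons c cs ih =>
    intro buf
    by_cases hc : c ∈ pvDelims
    · have hb : pvPB c = true := by simpa [pvPB] using hc
      simp only [pvScan, if_pos hc, ih, pvSplitP, hb, if_pos]
      by_cases hbuf : pvAllCons buf <;> simp [pvEmit, List.filter, hbuf]
    · have hb : pvPB c = false := by simpa [pvPB] using hc
      simp only [pvScan, if_neg hc, ih, pvSplitP, hb, Bool.false_eq_true]
      simp

lemma pv_Bword (t : List Char) :
    pvScan [] t = ((pvSplit pvPB t).filter pvAllCons).map String.ofList := by
  rw [pv_scan_eq]; rfl

lemma pvF1_eq (t : List Char) :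
    pvF1 t = ((pvSplit pvPB t).filter pvAllCons).map String.ofList := by
  unfold pvF1
  rw [pv_split_congr pvP1 pvPB pv_pred_eq]

-- ===== VERDICT (by name: the statement is the Claim_ definition above) =====
theorem consonants_in_spec : Claim_equal_consonants_in := by
  intro kinyaR _
  show consonants_in kinyaR = consonants_in_alt kinyaR
  have hA : consonants_in kinyaR =
      kinyaR.foldl (fun combo a0 =>
        combo ++ pvF1 (PySem.Chars.strip (PySem.Chars.lower a0.toList))) [] := by
    unfold consonants_in
    exact PySem.List.foldl_congr_mem _ _ _ _ (fun acc x _ => by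
      dsimp only
      simp only [pv_splitOn_single]
      exact pv_L1 (PySem.Chars.strip (PySem.Chars.lower x.toList)) acc)
  have hB : consonants_in_alt kinyaR =
      kinyaR.foldl (fun combo a0 =>
        combo ++ pvF1 (PySem.Chars.strip (PySem.Chars.lower a0.toList))) [] := by
    unfold consonants_in_alt
    exact PySem.List.foldl_congr_mem _ _ _ _ (fun acc x _ => by
      rw [pv_Bword, ← pvF1_eq])
  rw [hA, hB]
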